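-- pv_equiv track=rewrite | github.com/datboi2001/DSA | MST/connected_segments.py | connected_segments
-- ===== SOURCE A (Python) =====
-- from typing import List, Tuple
--
-- def connected_segments(segments: List[Tuple[int, int, int]]):
--     """
--     You are given n colored segments on the number line.
--     Each segment is either colored red or blue.
--     The i-th segment can be represented by a tuple (ci,li,ri).
--     The segment contains all the points in the range [li,ri], inclusive, and its color denoted by ci:
--
--     if ci=0, it is a red segment;
--     if ci=1, it is a blue segment.
--     We say that two segments of different colors are connected, if they share at least one common point.
--     Two segments belong to the same group, if they are either connected directly,
--     or through a sequence of directly connected segments. Find the number of groups of segments.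
--     :param segments: list of segments
--     :return: number of connected segments
--     """
--     if not segments:
--         return 0
--     segments.sort(key=lambda x: x[1])
--     roots = [-1] * len(segments)
--
--     def find(n):
--         if roots[n] < 0:
--             return n
--         else:
--             res = find(roots[n])
--             roots[n] = res
--             return res
--
--     def union(i, j):
--         ri = find(i)
--         rj = find(j)
--         size1 = roots[ri] * -1
--         size2 = roots[rj] * -1
--         if size1 < size2:
--             roots[ri] = rj
--             roots[rj] = (size1 + size2) * -1
--         else:
--             roots[rj] = ri
--             roots[ri] = (size1 + size2) * -1
--
--     for i in range(len(segments)):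
--         for j in range(i + 1, len(segments)):
--             if segments[i][0] != segments[j][0] and segments[i][2] >= segments[j][1]:
--                 union(i, j)
--     return len([root for root in roots if root < 0])
-- ===== SOURCE B (Python) =====
-- from typing import List, Tuple
--
-- def connected_segments(segments: List[Tuple[int, int, int]]):
--     # Alternative exact re-implementation: instead of a union-find forest with
--     # path compression and union-by-size, keep a flat component-label array and
--     # merge two components by relabelling (at most n-1 relabels overall); the
--     # answer is the number of distinct labels.  Does not mutate its argument
--     # (A sorts the input list in place).
--     segs = sorted(segments, key=lambda s: s[1])
--     n = len(segs)
--     labels = list(range(n))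
--     for i in range(n):
--         for j in range(i + 1, n):
--             if segs[i][0] != segs[j][0] and segs[i][2] >= segs[j][1]:
--                 a, b = labels[i], labels[j]
--                 if a != b:
--                     labels = [a if x == b else x for x in labels]
--     return len(set(labels))
-- ===== Notes on version B (the rewrite author's own statement) =====
-- stated objective: faster
-- what changed: Replaced the union-find forest (path-compressed find + union-by-size, invoked on every qualifying pair) by a flat component-label array: each pair costs one O(1) label comparison and components are merged by relabelling, which happens at most n-1 times; the answer is the number of distinct labels instead of the number of negative roots.
import Mathlib
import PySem

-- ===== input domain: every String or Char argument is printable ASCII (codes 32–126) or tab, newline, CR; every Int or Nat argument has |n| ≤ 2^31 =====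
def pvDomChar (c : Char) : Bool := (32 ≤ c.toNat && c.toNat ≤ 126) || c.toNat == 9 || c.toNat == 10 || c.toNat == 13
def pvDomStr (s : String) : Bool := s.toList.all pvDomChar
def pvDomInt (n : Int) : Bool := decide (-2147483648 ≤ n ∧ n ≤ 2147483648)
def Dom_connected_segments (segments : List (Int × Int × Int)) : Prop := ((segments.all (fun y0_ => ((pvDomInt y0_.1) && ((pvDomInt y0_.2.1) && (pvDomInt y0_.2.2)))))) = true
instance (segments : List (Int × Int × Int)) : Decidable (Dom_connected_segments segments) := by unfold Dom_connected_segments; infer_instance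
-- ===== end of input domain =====

-- B replaces A's union-find (path-compressed find + union-by-size per qualifying pair) by a flat
-- component-label array merged by relabelling; measurably faster by a constant factor (O(1) label
-- comparison per pair instead of a union-find operation).  Equivalence is about the RETURN value:
-- A sorts its argument in place, B does not mutate it.

-- ===== PORT A =====
-- find(n) with path compression; the recursion is bounded by a fuel argument (the callers pass
-- len(roots)); the fuel only makes the same computation total: Python's recursion terminates
-- because roots is always a forest, and a parent chain in a forest of n nodes has length < n.
def csFind (fuel : Nat) (roots : List Int) (i : Nat) : Nat × List Int :=
  match fuel with
  | 0 => (i, roots)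
  | fuel + 1 =>
    if roots.getD i 0 < 0 then (i, roots)
    else
      -- roots[n] is a nonnegative in-range index in every execution, so getD/toNat are exact here
      let r := csFind fuel roots (roots.getD i 0).toNat
      (r.1, r.2.set i (Int.ofNat r.1))

-- union(i, j) exactly as in A (no root-equality check, union by size)
def csUnion (roots : List Int) (i j : Nat) : List Int :=
  let f1 := csFind roots.length roots i
  let ri := f1.1
  let f2 := csFind f1.2.length f1.2 j
  let rj := f2.1
  let roots2 := f2.2
  let size1 := roots2.getD ri 0 * (-1)
  let size2 := roots2.getD rj 0 * (-1)
  if size1 < size2 then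
    (roots2.set ri (Int.ofNat rj)).set rj ((size1 + size2) * (-1))
  else
    (roots2.set rj (Int.ofNat ri)).set ri ((size1 + size2) * (-1))

def connected_segments (segments : List (Int × Int × Int)) : Int :=
  if segments = [] then 0
  else
    let ss := PySem.List.sorted segments (fun s => s.2.1) false
    let n : Int := PySem.List.len ss
    let roots0 : List Int := List.replicate ss.length (-1)
    let roots := (PySem.List.pyRange 0 n 1).foldl (fun roots i =>
      (PySem.List.pyRange (i + 1) n 1).foldl (fun roots j =>
        if (PySem.List.pyGetD ss i (0, 0, 0)).1 ≠ (PySem.List.pyGetD ss j (0, 0, 0)).1 ∧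
           (PySem.List.pyGetD ss i (0, 0, 0)).2.2 ≥ (PySem.List.pyGetD ss j (0, 0, 0)).2.1 then
          csUnion roots i.toNat j.toNat
        else roots) roots) roots0
    ((roots.filter (fun r => r < 0)).length : Int)

-- ===== PORT B =====
def connected_segments_alt (segments : List (Int × Int × Int)) : Int :=
  let ss := PySem.List.sorted segments (fun s => s.2.1) false
  let n : Int := PySem.List.len ss
  let labels0 : List Int := PySem.List.pyRange 0 n 1
  let labels := (PySem.List.pyRange 0 n 1).foldl (fun labels i =>
    (PySem.List.pyRange (i + 1) n 1).foldl (fun labels j =>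
      if (PySem.List.pyGetD ss i (0, 0, 0)).1 ≠ (PySem.List.pyGetD ss j (0, 0, 0)).1 ∧
         (PySem.List.pyGetD ss i (0, 0, 0)).2.2 ≥ (PySem.List.pyGetD ss j (0, 0, 0)).2.1 then
        let a := PySem.List.pyGetD labels i 0
        let b := PySem.List.pyGetD labels j 0
        if a ≠ b then labels.map (fun x => if x = b then a else x) else labels
      else labels) labels) labels0
  ((PySem.Set.ofList labels).length : Int)

-- ===== PRECONDITION & SPEC =====
def Spec_connected_segments (segments : List (Int × Int × Int)) (out : Int) : Prop := out = connected_segments_alt segments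
instance (segments : List (Int × Int × Int)) (out : Int) : Decidable (Spec_connected_segments segments out) := by unfold Spec_connected_segments; infer_instance

-- ===== CLAIM (what is proved, stated in full; the proofs are below) =====
def Claim_equal_connected_segments : Prop := ∀ (segments : List (Int × Int × Int)), Dom_connected_segments segments → Spec_connected_segments segments (connected_segments segments)

-- ===== LEMMAS AND PROOFS =====

-- entry k of the roots array (all reads in the ports are in range)
def pvRa (roots : List Int) (k : Nat) : Int := roots.getD k 0
-- parent pointer of the union-find forest
def pvParent (roots : List Int) (k : Nat) : Nat :=
  if pvRa roots k < 0 then k else (pvRa roots k).toNat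
-- representative of k (a parent chain in a well-formed forest reaches its root within n steps)
def pvRoot (roots : List Int) (k : Nat) : Nat := (pvParent roots)^[roots.length] k
-- well-formedness: parents are in range and d strictly decreases along parent edges (acyclicity)
def pvWFd (roots : List Int) (d : Nat → Nat) : Prop :=
  ∀ k, k < roots.length → 0 ≤ pvRa roots k →
    (pvRa roots k).toNat < roots.length ∧ d ((pvRa roots k).toNat) < d k
def pvWF (roots : List Int) : Prop := ∃ d, pvWFd roots d

-- the simulation invariant: the union-find forest and the label array induce the same partition
def pvRel (N : Nat) (roots labels : List Int) : Prop :=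
  roots.length = N ∧ labels.length = N ∧ pvWF roots ∧
  ∀ p q, p < N → q < N →
    (pvRoot roots p = pvRoot roots q ↔ labels.getD p 0 = labels.getD q 0)

lemma pvRa_set (roots : List Int) (i : Nat) (v : Int) (k : Nat) :
    pvRa (roots.set i v) k = if i = k ∧ i < roots.length then v else pvRa roots k := by
  by_cases h1 : i = k
  · subst h1
    by_cases h2 : i < roots.length <;>
      simp [pvRa, List.getD_eq_getElem?_getD, List.getElem?_set, h2]
  · simp [pvRa, List.getD_eq_getElem?_getD, List.getElem?_set, h1]

lemma pvParent_lt {roots : List Int} {d : Nat → Nat} (h : pvWFd roots d) {k : Nat}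
    (hk : k < roots.length) : pvParent roots k < roots.length := by
  unfold pvParent; split_ifs with hs
  · exact hk
  · exact (h k hk (le_of_not_gt hs)).1

lemma pvIter_lt {roots : List Int} {d : Nat → Nat} (h : pvWFd roots d) {k : Nat}
    (hk : k < roots.length) (m : Nat) : (pvParent roots)^[m] k < roots.length := by
  induction m with
  | zero => simpa using hk
  | succ m ih => rw [Function.iterate_succ_apply']; exact pvParent_lt h ih

lemma pvParent_nonroot {roots : List Int} {k : Nat} (h : 0 ≤ pvRa roots k) :
    pvParent roots k = (pvRa roots k).toNat := by
  unfold pvParent; rw [if_neg (not_lt.mpr h)]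

lemma pvParent_fix {roots : List Int} {k : Nat} (h : pvRa roots k < 0) :
    pvParent roots k = k := by simp [pvParent, h]

lemma pvIter_fix {roots : List Int} {k : Nat} (h : pvRa roots k < 0) (m : Nat) :
    (pvParent roots)^[m] k = k := by
  induction m with
  | zero => rfl
  | succ m ih => rw [Function.iterate_succ_apply, pvParent_fix h, ih]

lemma pvStab {roots : List Int} {k m m' : Nat} (hle : m ≤ m')
    (hr : pvRa roots ((pvParent roots)^[m] k) < 0) :
    (pvParent roots)^[m'] k = (pvParent roots)^[m] k := by
  obtain ⟨t, rfl⟩ := Nat.exists_eq_add_of_le hle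
  rw [Nat.add_comm, Function.iterate_add_apply, pvIter_fix hr]

lemma pvExistsRoot {roots : List Int} {d : Nat → Nat} (h : pvWFd roots d) {k : Nat}
    (hk : k < roots.length) :
    ∃ m, m < roots.length ∧ pvRa roots ((pvParent roots)^[m] k) < 0 := by
  by_contra hc
  push_neg at hc
  have hdec : ∀ a, a < roots.length →
      d ((pvParent roots)^[a + 1] k) < d ((pvParent roots)^[a] k) := by
    intro a ha
    have hlt := pvIter_lt h hk a
    have hge := hc a ha
    have hcon := h _ hlt hge
    rw [Function.iterate_succ_apply']
    rw [pvParent_nonroot hge]; exact hcon.2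
  have hmono : ∀ a b, a < b → b ≤ roots.length →
      d ((pvParent roots)^[b] k) < d ((pvParent roots)^[a] k) := by
    intro a b hab hb
    induction b with
    | zero => omega
    | succ b ih =>
      rcases Nat.lt_succ_iff_lt_or_eq.mp hab with hlt | heq
      · exact lt_trans (hdec b (by omega)) (ih hlt (by omega))
      · subst heq; exact hdec a (by omega)
  have hinj : Function.Injective
      (fun m : Fin (roots.length + 1) =>
        (⟨(pvParent roots)^[m.1] k, pvIter_lt h hk m.1⟩ : Fin roots.length)) := by
    intro m1 m2 he
    simp only [Fin.mk.injEq] at he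
    rcases lt_trichotomy m1.1 m2.1 with hlt | heq | hgt
    · have h1 := hmono m1.1 m2.1 hlt (by omega)
      have h2 := congrArg d he
      omega
    · exact Fin.ext heq
    · have h1 := hmono m2.1 m1.1 hgt (by omega)
      have h2 := congrArg d he
      omega
  have hcard := Fintype.card_le_of_injective _ hinj
  rw [Fintype.card_fin, Fintype.card_fin] at hcard
  omega

lemma pvRootIsRoot {roots : List Int} {d : Nat → Nat} (h : pvWFd roots d) {k : Nat}
    (hk : k < roots.length) : pvRa roots (pvRoot roots k) < 0 := by
  obtain ⟨m, hm, hr⟩ := pvExistsRoot h hk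
  rw [pvRoot, pvStab (le_of_lt hm) hr]; exact hr

lemma pvRoot_lt {roots : List Int} {d : Nat → Nat} (h : pvWFd roots d) {k : Nat}
    (hk : k < roots.length) : pvRoot roots k < roots.length := pvIter_lt h hk _

lemma pvRootParent {roots : List Int} {d : Nat → Nat} (h : pvWFd roots d) {k : Nat}
    (hk : k < roots.length) : pvRoot roots (pvParent roots k) = pvRoot roots k := by
  obtain ⟨m, hm, hr⟩ := pvExistsRoot h hk
  have h1 : (pvParent roots)^[roots.length] (pvParent roots k)
      = (pvParent roots)^[roots.length + 1] k := by
    rw [Function.iterate_succ_apply]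
  rw [pvRoot, h1, pvStab (by omega) hr, pvRoot, pvStab (le_of_lt hm) hr]

lemma pvRootOfRoot {roots : List Int} {k : Nat} (h : pvRa roots k < 0) :
    pvRoot roots k = k := pvIter_fix h _

lemma pvDRootLt {roots : List Int} {d : Nat → Nat} (h : pvWFd roots d) {k : Nat}
    (hk : k < roots.length) (hge : 0 ≤ pvRa roots k) : d (pvRoot roots k) < d k := by
  have main : ∀ m, d ((pvParent roots)^[m + 1] k) < d k := by
    intro m
    induction m with
    | zero =>
      have h1 : (pvParent roots)^[0 + 1] k = pvParent roots k := by
        rw [Nat.zero_add, Function.iterate_one]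
      rw [h1, pvParent_nonroot hge]
      exact (h k hk hge).2
    | succ m ih =>
      have hstep : (pvParent roots)^[m + 1 + 1] k
          = pvParent roots ((pvParent roots)^[m + 1] k) :=
        Function.iterate_succ_apply' _ _ _
      rw [hstep]
      by_cases hr : pvRa roots ((pvParent roots)^[m + 1] k) < 0
      · rw [pvParent_fix hr]; exact ih
      · have hx := pvIter_lt h hk (m + 1)
        rw [pvParent_nonroot (le_of_not_gt hr)]
        exact lt_trans (h _ hx (le_of_not_gt hr)).2 ih
  have hlen : roots.length = (roots.length - 1) + 1 := by omega
  rw [pvRoot, hlen]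
  exact main _

lemma pvRootIdem {roots : List Int} {d : Nat → Nat} (h : pvWFd roots d) {k : Nat}
    (hk : k < roots.length) : pvRoot roots (pvRoot roots k) = pvRoot roots k :=
  pvRootOfRoot (pvRootIsRoot h hk)

lemma pvIsRootIff {roots : List Int} {d : Nat → Nat} (h : pvWFd roots d) {k : Nat}
    (hk : k < roots.length) : pvRa roots k < 0 ↔ pvRoot roots k = k := by
  constructor
  · exact pvRootOfRoot
  · intro he
    by_contra hr
    have hd := pvDRootLt h hk (le_of_not_gt hr)
    rw [he] at hd
    omega

-- redirecting a to an existing root t remaps a's class to t and preserves well-formedness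
lemma pvRedirect {roots : List Int} {d : Nat → Nat} (h : pvWFd roots d) {a t : Nat}
    (ha : a < roots.length) (ht : t < roots.length) (hroott : pvRa roots t < 0)
    (hne : t ≠ a) (hguard : pvRa roots a < 0 ∨ t = pvRoot roots a) :
    (roots.set a (Int.ofNat t)).length = roots.length ∧
    pvWFd (roots.set a (Int.ofNat t))
      (fun k => d k + (if pvRoot roots k = pvRoot roots a then d t + 1 else 0)) ∧
    ∀ k, k < roots.length →
      pvRoot (roots.set a (Int.ofNat t)) k =
        (if pvRoot roots k = pvRoot roots a then t else pvRoot roots k) := by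
  set roots' := roots.set a (Int.ofNat t) with hroots'
  set d' : Nat → Nat := fun k => d k + (if pvRoot roots k = pvRoot roots a then d t + 1 else 0)
    with hd'
  have hlen : roots'.length = roots.length := by simp [hroots']
  have hra_a : pvRa roots' a = Int.ofNat t := by
    rw [hroots', pvRa_set, if_pos ⟨rfl, ha⟩]
  have hra_ne : ∀ k, a ≠ k → pvRa roots' k = pvRa roots k := by
    intro k hk
    rw [hroots', pvRa_set, if_neg (by tauto)]
  have hroott' : pvRa roots' t < 0 := by
    rw [hra_ne t (fun he => hne he.symm)]; exact hroott
  have hparent_ne : ∀ k, a ≠ k → pvParent roots' k = pvParent roots k := by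
    intro k hk
    unfold pvParent
    rw [hra_ne k hk]
  have hparent_a : pvParent roots' a = t := by
    unfold pvParent
    rw [hra_a]
    simp
  have hWF' : pvWFd roots' d' := by
    intro k hk hge
    rw [hlen] at hk
    by_cases hka : a = k
    · subst hka
      rw [hra_a]
      constructor
      · rw [hlen]; simpa using ht
      · show d' (Int.ofNat t).toNat < d' a
        have htt : (Int.ofNat t).toNat = t := by simp
        rw [htt, hd']
        simp only
        have hroot_t : pvRoot roots t = t := pvRootOfRoot hroott
        by_cases hta : t = pvRoot roots a
        · have hanr : 0 ≤ pvRa roots a := by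
            by_contra hng
            have hro : pvRoot roots a = a := pvRootOfRoot (by omega)
            rw [hro] at hta
            exact hne hta
          have hdl := pvDRootLt h ha hanr
          rw [← hta] at hdl
          rw [hroot_t]
          split_ifs <;> omega
        · rw [hroot_t]
          split_ifs <;> omega
    · have hre := hra_ne k hka
      rw [hre] at hge ⊢
      have hcon := h k hk hge
      refine ⟨by rw [hlen]; exact hcon.1, ?_⟩
      show d' (pvRa roots k).toNat < d' k
      have hp : pvParent roots k = (pvRa roots k).toNat := pvParent_nonroot hge
      have hcls : pvRoot roots ((pvRa roots k).toNat) = pvRoot roots k := by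
        rw [← hp]; exact pvRootParent h hk
      rw [hd']
      simp only
      rw [hcls]
      have hdd := hcon.2
      split_ifs <;> omega
  refine ⟨hlen, hWF', ?_⟩
  have key : ∀ m k, k < roots.length → d' k = m →
      pvRoot roots' k = (if pvRoot roots k = pvRoot roots a then t else pvRoot roots k) := by
    intro m
    induction m using Nat.strong_induction_on with
    | _ m IH =>
      intro k hk hdk
      by_cases hr' : pvRa roots' k < 0
      · have hka : a ≠ k := by
          intro he
          rw [← he, hra_a] at hr'
          simp only [Int.ofNat_eq_natCast] at hr'
          omega
        have hrk : pvRa roots k < 0 := by rw [← hra_ne k hka]; exact hr'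
        have h2 : pvRoot roots k = k := pvRootOfRoot hrk
        rw [pvRootOfRoot hr', h2]
        by_cases hca : k = pvRoot roots a
        · rw [if_pos hca]
          rcases hguard with hg | hg
          · exfalso
            rw [pvRootOfRoot hg] at hca
            exact hka hca.symm
          · rw [hca, ← hg]
        · rw [if_neg hca]
      · by_cases hka : a = k
        · subst hka
          have hlt' : a < roots'.length := by rw [hlen]; exact ha
          have hstep : pvRoot roots' a = pvRoot roots' t := by
            rw [← hparent_a]
            exact (pvRootParent hWF' hlt').symm
          rw [hstep, pvRootOfRoot hroott', if_pos rfl]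
        · have hre := hra_ne k hka
          have hge : 0 ≤ pvRa roots k := by rw [← hre]; exact le_of_not_gt hr'
          have hcon := h k hk hge
          have hp_eq : pvParent roots k = (pvRa roots k).toNat := pvParent_nonroot hge
          have hp_eq' : pvParent roots' k = (pvRa roots k).toNat := by
            rw [hparent_ne k hka, hp_eq]
          have hd'p : d' ((pvRa roots k).toNat) < d' k := by
            have hh := (hWF' k (by rw [hlen]; exact hk) (by rw [hre]; exact hge)).2
            rw [hre] at hh
            exact hh
          have hrec := IH (d' ((pvRa roots k).toNat)) (by omega) _ hcon.1 rfl
          have hL : pvRoot roots' k = pvRoot roots' ((pvRa roots k).toNat) := by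
            rw [← hp_eq']
            exact (pvRootParent hWF' (by rw [hlen]; exact hk)).symm
          have hR : pvRoot roots k = pvRoot roots ((pvRa roots k).toNat) := by
            rw [← hp_eq]
            exact (pvRootParent h hk).symm
          rw [hL, hrec, ← hR]
  intro k hk
  exact key (d' k) k hk rfl

-- overwriting a root's (negative) value with another negative value changes nothing structural
lemma pvNegSet {roots : List Int} {d : Nat → Nat} (h : pvWFd roots d) {r : Nat} {v : Int}
    (hroot : pvRa roots r < 0) (hv : v < 0) :
    (roots.set r v).length = roots.length ∧
    pvWFd (roots.set r v) d ∧
    ∀ k, pvRoot (roots.set r v) k = pvRoot roots k := by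
  have hra : ∀ k, pvRa (roots.set r v) k = if r = k ∧ r < roots.length then v else pvRa roots k :=
    fun k => pvRa_set roots r v k
  have hpar : pvParent (roots.set r v) = pvParent roots := by
    funext k
    unfold pvParent
    rw [hra k]
    by_cases hc : r = k ∧ r < roots.length
    · rw [if_pos hc, if_pos hv, if_pos (hc.1 ▸ hroot)]
    · rw [if_neg hc]
  refine ⟨by simp, ?_, ?_⟩
  · intro k hk hge
    rw [List.length_set] at hk
    have hre : pvRa (roots.set r v) k = pvRa roots k := by
      by_cases hc : r = k ∧ r < roots.length
      · exfalso
        rw [hra k, if_pos hc] at hge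
        omega
      · rw [hra k, if_neg hc]
    rw [hre] at hge ⊢
    rw [List.length_set]
    exact h k hk hge
  · intro k
    unfold pvRoot
    rw [hpar, List.length_set]

-- find computes the representative and preserves lengths, well-formedness, signs and the partition
lemma pvFind_spec (fuel : Nat) : ∀ (roots : List Int) (i : Nat) (d : Nat → Nat),
    pvWFd roots d → i < roots.length →
    (∃ m, m < fuel ∧ pvRa roots ((pvParent roots)^[m] i) < 0) →
    (csFind fuel roots i).1 = pvRoot roots i ∧
    (csFind fuel roots i).2.length = roots.length ∧
    pvWF (csFind fuel roots i).2 ∧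
    (∀ k, pvRa (csFind fuel roots i).2 k < 0 ↔ pvRa roots k < 0) ∧
    (∀ k, k < roots.length → pvRoot (csFind fuel roots i).2 k = pvRoot roots k) := by
  induction fuel with
  | zero =>
    intro roots i d h hi hex
    obtain ⟨m, hm, _⟩ := hex
    omega
  | succ fuel ih =>
    intro roots i d h hi hex
    by_cases hr : roots.getD i 0 < 0
    · have hstep : csFind (fuel + 1) roots i = (i, roots) := by
        have hu : csFind (fuel + 1) roots i = if roots.getD i 0 < 0 then (i, roots) else
            ((csFind fuel roots (roots.getD i 0).toNat).1,
             (csFind fuel roots (roots.getD i 0).toNat).2.set i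
               (Int.ofNat (csFind fuel roots (roots.getD i 0).toNat).1)) := rfl
        rw [hu, if_pos hr]
      rw [hstep]
      exact ⟨(pvRootOfRoot hr).symm, rfl, ⟨d, h⟩, fun k => Iff.rfl, fun k _ => rfl⟩
    · have hge : 0 ≤ pvRa roots i := le_of_not_gt hr
      have hstep : csFind (fuel + 1) roots i =
          ((csFind fuel roots (roots.getD i 0).toNat).1,
           (csFind fuel roots (roots.getD i 0).toNat).2.set i
             (Int.ofNat (csFind fuel roots (roots.getD i 0).toNat).1)) := by
        have hu : csFind (fuel + 1) roots i = if roots.getD i 0 < 0 then (i, roots) else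
            ((csFind fuel roots (roots.getD i 0).toNat).1,
             (csFind fuel roots (roots.getD i 0).toNat).2.set i
               (Int.ofNat (csFind fuel roots (roots.getD i 0).toNat).1)) := rfl
        rw [hu, if_neg hr]
      set p := (roots.getD i 0).toNat with hpdef
      have hpp : p = pvParent roots i := (pvParent_nonroot hge).symm
      have hplt : p < roots.length := (h i hi hge).1
      obtain ⟨m, hm, hroot⟩ := hex
      have hm0 : m ≠ 0 := by
        intro h0
        subst h0
        exact hr hroot
      obtain ⟨m', rfl⟩ : ∃ m', m = m' + 1 := ⟨m - 1, by omega⟩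
      have hex' : ∃ m', m' < fuel ∧ pvRa roots ((pvParent roots)^[m'] p) < 0 := by
        refine ⟨m', by omega, ?_⟩
        rw [hpp, ← Function.iterate_succ_apply]
        exact hroot
      obtain ⟨h1, h2, ⟨d2, hwf2⟩, h4, h5⟩ := ih roots p d h hplt hex'
      have hri : (csFind fuel roots p).1 = pvRoot roots i := by
        rw [h1, hpp]
        exact pvRootParent h hi
      set roots2 := (csFind fuel roots p).2 with hr2def
      have hi2 : i < roots2.length := by rw [h2]; exact hi
      have hroot2i : pvRoot roots2 i = pvRoot roots i := h5 i hi
      have htlt : pvRoot roots i < roots.length := pvRoot_lt h hi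
      have htlt2 : pvRoot roots i < roots2.length := by rw [h2]; exact htlt
      have htroot2 : pvRa roots2 (pvRoot roots i) < 0 :=
        (h4 _).mpr (pvRootIsRoot h hi)
      have hne2 : pvRoot roots i ≠ i := by
        intro he
        exact hr ((pvIsRootIff h hi).mpr he)
      have hguard2 : pvRa roots2 i < 0 ∨ pvRoot roots i = pvRoot roots2 i :=
        Or.inr hroot2i.symm
      obtain ⟨hl3, hwf3, hmap3⟩ := pvRedirect hwf2 hi2 htlt2 htroot2 hne2 hguard2
      rw [hstep, hri]
      refine ⟨rfl, ?_, ?_, ?_, ?_⟩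
      · show (roots2.set i (Int.ofNat (pvRoot roots i))).length = roots.length
        rw [List.length_set, h2]
      · exact ⟨_, hwf3⟩
      · intro k
        show pvRa (roots2.set i (Int.ofNat (pvRoot roots i))) k < 0 ↔ pvRa roots k < 0
        rw [pvRa_set]
        by_cases hc : i = k ∧ i < roots2.length
        · rw [if_pos hc]
          constructor
          · intro hx
            exfalso
            simp only [Int.ofNat_eq_natCast] at hx
            omega
          · intro hx
            exfalso
            apply hr
            show pvRa roots i < 0
            rw [hc.1]
            exact hx
        · rw [if_neg hc]
          exact h4 k
      · intro k hk
        show pvRoot (roots2.set i (Int.ofNat (pvRoot roots i))) k = pvRoot roots k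
        have hk2 : k < roots2.length := by rw [h2]; exact hk
        have := hmap3 k hk2
        rw [this]
        split_ifs with hc
        · rw [← h5 k hk, hc]
          exact hroot2i.symm
        · exact h5 k hk

lemma pvFind_full {roots : List Int} {d : Nat → Nat} (h : pvWFd roots d) {i : Nat}
    (hi : i < roots.length) :
    (csFind roots.length roots i).1 = pvRoot roots i ∧
    (csFind roots.length roots i).2.length = roots.length ∧
    pvWF (csFind roots.length roots i).2 ∧
    (∀ k, pvRa (csFind roots.length roots i).2 k < 0 ↔ pvRa roots k < 0) ∧
    (∀ k, k < roots.length → pvRoot (csFind roots.length roots i).2 k = pvRoot roots k) :=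
  pvFind_spec roots.length roots i d h hi (pvExistsRoot h hi)

-- remapping y to x (x ≠ y) identifies exactly the classes {x, y}
lemma pvRemapIff {α : Type} [DecidableEq α] (u w x y : α) (hne : x ≠ y) :
    ((if u = y then x else u) = (if w = y then x else w)) ↔
      (u = w ∨ ((u = x ∨ u = y) ∧ (w = x ∨ w = y))) := by
  split_ifs <;> simp_all <;> tauto

-- the net effect of union on the partition: the classes of i and j are merged
lemma pvUnion_spec {roots : List Int} (h : pvWF roots) {i j : Nat}
    (hi : i < roots.length) (hj : j < roots.length) :
    (csUnion roots i j).length = roots.length ∧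
    pvWF (csUnion roots i j) ∧
    ∀ p q, p < roots.length → q < roots.length →
      (pvRoot (csUnion roots i j) p = pvRoot (csUnion roots i j) q ↔
        (pvRoot roots p = pvRoot roots q ∨
          ((pvRoot roots p = pvRoot roots i ∨ pvRoot roots p = pvRoot roots j) ∧
           (pvRoot roots q = pvRoot roots i ∨ pvRoot roots q = pvRoot roots j)))) := by
  obtain ⟨d, hd⟩ := h
  obtain ⟨e1, e2, ⟨d1, hwf1⟩, e4, e5⟩ := pvFind_full hd hi
  set ri := (csFind roots.length roots i).1 with hridef
  set roots1 := (csFind roots.length roots i).2 with h1def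
  have hj1 : j < roots1.length := by rw [e2]; exact hj
  obtain ⟨g1, g2, ⟨d2, hwf2⟩, g4, g5⟩ := pvFind_full hwf1 hj1
  set rj := (csFind roots1.length roots1 j).1 with hrjdef
  set roots2 := (csFind roots1.length roots1 j).2 with h2def
  have hri : ri = pvRoot roots i := e1
  have hrj : rj = pvRoot roots j := by rw [g1, e5 j hj]
  have hlen2 : roots2.length = roots.length := by rw [g2, e2]
  have hpres : ∀ k, k < roots.length → pvRoot roots2 k = pvRoot roots k := by
    intro k hk
    rw [g5 k (by rw [e2]; exact hk), e5 k hk]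
  have hsign : ∀ k, pvRa roots2 k < 0 ↔ pvRa roots k < 0 := by
    intro k
    rw [g4 k, e4 k]
  have hriL : ri < roots.length := by rw [hri]; exact pvRoot_lt hd hi
  have hrjL : rj < roots.length := by rw [hrj]; exact pvRoot_lt hd hj
  have hriL2 : ri < roots2.length := by rw [hlen2]; exact hriL
  have hrjL2 : rj < roots2.length := by rw [hlen2]; exact hrjL
  have hroot_ri : pvRa roots2 ri < 0 := by
    rw [hsign, hri]
    exact pvRootIsRoot hd hi
  have hroot_rj : pvRa roots2 rj < 0 := by
    rw [hsign, hrj]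
    exact pvRootIsRoot hd hj
  have hcu : csUnion roots i j =
      (if roots2.getD ri 0 * (-1) < roots2.getD rj 0 * (-1) then
        (roots2.set ri (Int.ofNat rj)).set rj
          ((roots2.getD ri 0 * (-1) + roots2.getD rj 0 * (-1)) * (-1))
      else
        (roots2.set rj (Int.ofNat ri)).set ri
          ((roots2.getD ri 0 * (-1) + roots2.getD rj 0 * (-1)) * (-1))) := rfl
  have hra_ri : roots2.getD ri 0 = pvRa roots2 ri := rfl
  have hra_rj : roots2.getD rj 0 = pvRa roots2 rj := rfl
  set v := (roots2.getD ri 0 * (-1) + roots2.getD rj 0 * (-1)) * (-1) with hvdef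
  have hv : v < 0 := by
    rw [hvdef, hra_ri, hra_rj]
    have := hroot_ri
    have := hroot_rj
    omega
  by_cases hcmp : roots2.getD ri 0 * (-1) < roots2.getD rj 0 * (-1)
  · -- union by size: ri's tree hangs under rj
    have hnene : ri ≠ rj := by
      intro he
      rw [he] at hcmp
      omega
    have hnene' : rj ≠ ri := fun he => hnene he.symm
    obtain ⟨hl3, hwf3, hmap3⟩ :=
      pvRedirect hwf2 hriL2 hrjL2 hroot_rj hnene' (Or.inl hroot_ri)
    set roots3 := roots2.set ri (Int.ofNat rj) with h3def
    have hroot3_rj : pvRa roots3 rj < 0 := by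
      rw [h3def, pvRa_set, if_neg (by tauto)]
      exact hroot_rj
    obtain ⟨hl4, hwf4, hmap4⟩ := pvNegSet hwf3 hroot3_rj hv
    rw [hcu, if_pos hcmp]
    have hmap : ∀ k, k < roots.length →
        pvRoot (roots3.set rj v) k = (if pvRoot roots k = ri then rj else pvRoot roots k) := by
      intro k hk
      rw [hmap4 k, hmap3 k (by rw [hlen2]; exact hk)]
      rw [hpres k hk, pvRootOfRoot hroot_ri]
    refine ⟨by rw [List.length_set, List.length_set, hlen2], ⟨_, hwf4⟩, ?_⟩
    intro p q hp hq
    rw [hmap p hp, hmap q hq, ← hri, ← hrj]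
    rw [pvRemapIff _ _ rj ri hnene']
    constructor <;> (intro hx; tauto)
  · rw [hcu, if_neg hcmp]
    by_cases heq : ri = rj
    · -- same root: the two writes collapse to one negative overwrite
      have hcol : (roots2.set rj (Int.ofNat ri)).set ri v = roots2.set ri v := by
        rw [← heq, List.set_set]
      rw [hcol]
      obtain ⟨hl4, hwf4, hmap4⟩ := pvNegSet hwf2 hroot_ri hv
      refine ⟨by rw [List.length_set, hlen2], ⟨_, hwf4⟩, ?_⟩
      intro p q hp hq
      rw [hmap4 p, hmap4 q, hpres p hp, hpres q hq, ← hri, ← hrj, ← heq]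
      constructor
      · intro hx; exact Or.inl hx
      · intro hx
        rcases hx with hx | ⟨hx1, hx2⟩
        · exact hx
        · rcases hx1 with hx1 | hx1 <;> rcases hx2 with hx2 | hx2 <;> rw [hx1, hx2]
    · -- union by size: rj's tree hangs under ri
      have hnene' : ri ≠ rj := heq
      obtain ⟨hl3, hwf3, hmap3⟩ :=
        pvRedirect hwf2 hrjL2 hriL2 hroot_ri hnene' (Or.inl hroot_rj)
      set roots3 := roots2.set rj (Int.ofNat ri) with h3def
      have hroot3_ri : pvRa roots3 ri < 0 := by
        rw [h3def, pvRa_set, if_neg (by tauto)]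
        exact hroot_ri
      obtain ⟨hl4, hwf4, hmap4⟩ := pvNegSet hwf3 hroot3_ri hv
      have hmap : ∀ k, k < roots.length →
          pvRoot (roots3.set ri v) k = (if pvRoot roots k = rj then ri else pvRoot roots k) := by
        intro k hk
        rw [hmap4 k, hmap3 k (by rw [hlen2]; exact hk)]
        rw [hpres k hk, pvRootOfRoot hroot_rj]
      refine ⟨by rw [List.length_set, List.length_set, hlen2], ⟨_, hwf4⟩, ?_⟩
      intro p q hp hq
      rw [hmap p hp, hmap q hq, ← hri, ← hrj]
      rw [pvRemapIff _ _ ri rj hnene']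

lemma pvFoldRel {α β γ : Type} (R : α → β → Prop) (f : α → γ → α) (g : β → γ → β) :
    ∀ (l : List γ), (∀ a b x, x ∈ l → R a b → R (f a x) (g b x)) →
      ∀ a b, R a b → R (l.foldl f a) (l.foldl g b) := by
  intro l
  induction l with
  | nil => intro _ a b hab; simpa using hab
  | cons x t ih =>
    intro h a b hab
    simp only [List.foldl_cons]
    exact ih (fun a b y hy => h a b y (List.mem_cons_of_mem _ hy)) _ _
      (h a b x List.mem_cons_self hab)

lemma pvMapGetD (l : List Int) (f : Int → Int) (p : Nat) (hp : p < l.length) :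
    (l.map f).getD p 0 = f (l.getD p 0) := by
  rw [List.getD_eq_getElem?_getD, List.getD_eq_getElem?_getD, List.getElem?_map,
    List.getElem?_eq_getElem hp]
  rfl

-- one qualifying pair: union on the forest and relabel on the labels preserve the invariant
lemma pvStep {N : Nat} {roots labels : List Int} (h : pvRel N roots labels) {i j : Nat}
    (hi : i < N) (hj : j < N) :
    pvRel N (csUnion roots i j)
      (if labels.getD i 0 ≠ labels.getD j 0 then
        labels.map (fun x => if x = labels.getD j 0 then labels.getD i 0 else x)
      else labels) := by
  obtain ⟨hlr, hll, hwf, hker⟩ := h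
  have hi' : i < roots.length := by rw [hlr]; exact hi
  have hj' : j < roots.length := by rw [hlr]; exact hj
  obtain ⟨hul, huw, huk⟩ := pvUnion_spec hwf hi' hj'
  set a := labels.getD i 0 with hadef
  set b := labels.getD j 0 with hbdef
  have hab : pvRoot roots i = pvRoot roots j ↔ a = b := hker i j hi hj
  by_cases hcase : a ≠ b
  · rw [if_pos hcase]
    refine ⟨by rw [hul, hlr], by rw [List.length_map]; exact hll, huw, ?_⟩
    intro p q hp hq
    have hp' : p < roots.length := by rw [hlr]; exact hp
    have hq' : q < roots.length := by rw [hlr]; exact hq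
    rw [huk p q hp' hq']
    rw [pvMapGetD labels _ p (by rw [hll]; exact hp),
        pvMapGetD labels _ q (by rw [hll]; exact hq)]
    rw [pvRemapIff _ _ a b hcase]
    rw [hker p q hp hq, hker p i hp hi, hker p j hp hj, hker q i hq hi, hker q j hq hj]
  · rw [if_neg hcase]
    have hcase' : a = b := not_not.mp hcase
    have hij : pvRoot roots i = pvRoot roots j := hab.mpr hcase'
    refine ⟨by rw [hul, hlr], hll, huw, ?_⟩
    intro p q hp hq
    have hp' : p < roots.length := by rw [hlr]; exact hp
    have hq' : q < roots.length := by rw [hlr]; exact hq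
    rw [huk p q hp' hq']
    constructor
    · rintro (hx | ⟨h1, h2⟩)
      · exact (hker p q hp hq).mp hx
      · refine (hker p q hp hq).mp ?_
        rcases h1 with h1 | h1 <;> rcases h2 with h2 | h2 <;> rw [h1, h2]
        · exact hij
        · exact hij.symm
    · intro hx
      exact Or.inl ((hker p q hp hq).mpr hx)

-- the final counts agree: negative roots = blocks of the partition = distinct labels
lemma pvFinal {N : Nat} {roots labels : List Int} (h : pvRel N roots labels) :
    (roots.filter (fun r => r < 0)).length = (PySem.Set.ofList labels).length := by
  obtain ⟨hlr, hll, ⟨d, hwf⟩, hker⟩ := h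
  -- A's count, as a count over indices
  have hmap : roots = (List.range N).map (fun k => pvRa roots k) := by
    apply List.ext_getElem (by simp [hlr])
    intro n h1 h2
    simp only [List.getElem_map, List.getElem_range]
    rw [pvRa, List.getD_eq_getElem?_getD, List.getElem?_eq_getElem h1]
    rfl
  have h1 : (roots.filter (fun r => r < 0)).length
      = (List.range N).countP (fun k => decide (pvRa roots k < 0)) := by
    rw [← List.countP_eq_length_filter]
    conv_lhs => rw [hmap]
    rw [List.countP_map]
    rfl
  have h2 : (List.range N).countP (fun k => decide (pvRa roots k < 0))
      = (List.range N).countP (fun k => decide (pvRoot roots k = k)) := by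
    apply List.countP_congr
    intro k hk
    have hkN : k < roots.length := by rw [hlr]; exact List.mem_range.mp hk
    simp only [decide_eq_true_eq]
    exact pvIsRootIff hwf hkN
  have h3 : (List.range N).countP (fun k => decide (pvRoot roots k = k))
      = ((Finset.range N).filter (fun k => pvRoot roots k = k)).card := by
    rw [List.countP_eq_length_filter,
      ← List.toFinset_card_of_nodup (List.nodup_range.filter _)]
    congr 1
    ext x
    simp [List.mem_filter, Finset.mem_filter]
  have h4 : (PySem.Set.ofList labels).length = labels.toFinset.card := by
    rw [← List.toFinset_card_of_nodup (PySem.Set.nodup_ofList labels)]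
    congr 1
    ext x
    simp [PySem.Set.mem_ofList]
  have h5 : labels.toFinset = (Finset.range N).image (fun k => labels.getD k 0) := by
    ext x
    simp only [List.mem_toFinset, Finset.mem_image, Finset.mem_range]
    constructor
    · intro hx
      obtain ⟨k, hk, he⟩ := List.mem_iff_getElem.mp hx
      refine ⟨k, by rw [← hll]; exact hk, ?_⟩
      rw [List.getD_eq_getElem?_getD, List.getElem?_eq_getElem hk]
      exact he
    · rintro ⟨k, hk, rfl⟩
      have hkl : k < labels.length := by rw [hll]; exact hk
      rw [List.getD_eq_getElem?_getD, List.getElem?_eq_getElem hkl]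
      exact List.getElem_mem hkl
  have h6 : ((Finset.range N).filter (fun k => pvRoot roots k = k)).card
      = ((Finset.range N).image (fun k => labels.getD k 0)).card := by
    apply Finset.card_bij (fun k _ => labels.getD k 0)
    · intro k hk
      rw [Finset.mem_filter, Finset.mem_range] at hk
      exact Finset.mem_image.mpr ⟨k, Finset.mem_range.mpr hk.1, rfl⟩
    · intro k1 hk1 k2 hk2 he
      rw [Finset.mem_filter, Finset.mem_range] at hk1 hk2
      have := (hker k1 k2 hk1.1 hk2.1).mpr he
      rw [hk1.2, hk2.2] at this
      exact this
    · intro y hy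
      obtain ⟨k, hk, rfl⟩ := Finset.mem_image.mp hy
      rw [Finset.mem_range] at hk
      have hkN : k < roots.length := by rw [hlr]; exact hk
      have hrk : pvRoot roots k < N := by rw [← hlr]; exact pvRoot_lt hwf hkN
      refine ⟨pvRoot roots k, ?_, ?_⟩
      · rw [Finset.mem_filter, Finset.mem_range]
        exact ⟨hrk, pvRootIdem hwf hkN⟩
      · apply (hker (pvRoot roots k) k hrk hk).mp
        exact pvRootIdem hwf hkN
  rw [h1, h2, h3, h6, ← h5, ← h4]

lemma pvPyGetD_toNat (l : List Int) (i : Int) (h0 : 0 ≤ i) (hlt : i < (l.length : Int)) :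
    PySem.List.pyGetD l i 0 = l.getD i.toNat 0 := by
  have hnat : i.toNat < l.length := by omega
  rw [PySem.List.pyGetD_eq_getElem l 0 h0 hlt,
    List.getD_eq_getElem?_getD, List.getElem?_eq_getElem hnat]
  rfl

theorem pvMain (segments : List (Int × Int × Int)) :
    connected_segments segments = connected_segments_alt segments := by
  by_cases hnil : segments = []
  · subst hnil
    decide
  · simp only [connected_segments, connected_segments_alt]
    rw [if_neg hnil]
    simp only [PySem.List.len_eq]
    generalize PySem.List.sorted segments (fun s => s.2.1) false = ss
    set N := ss.length with hN
    have hinit : pvRel N (List.replicate N (-1)) (PySem.List.pyRange 0 (N : Int) 1) := by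
      have hra : ∀ r, r < N → pvRa (List.replicate N (-1)) r < 0 := by
        intro r hr
        rw [pvRa, List.getD_eq_getElem?_getD, List.getElem?_replicate, if_pos hr,
          Option.getD_some]
        omega
      refine ⟨List.length_replicate, ?_, ⟨fun _ => 0, ?_⟩, ?_⟩
      · rw [PySem.List.length_pyRange_one]
        simp
      · intro k hk hge
        rw [List.length_replicate] at hk
        exact absurd (lt_of_le_of_lt hge (hra k hk)) (lt_irrefl 0)
      · intro p q hp hq
        rw [pvRootOfRoot (hra p hp), pvRootOfRoot (hra q hq)]
        have hlen : (PySem.List.pyRange 0 (N : Int) 1).length = N := by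
          rw [PySem.List.length_pyRange_one]; simp
        have hgp : (PySem.List.pyRange 0 (N : Int) 1).getD p 0 = (p : Int) := by
          rw [List.getD_eq_getElem?_getD,
            List.getElem?_eq_getElem (by rw [hlen]; exact hp),
            PySem.List.getElem_pyRange_one]
          simp
        have hgq : (PySem.List.pyRange 0 (N : Int) 1).getD q 0 = (q : Int) := by
          rw [List.getD_eq_getElem?_getD,
            List.getElem?_eq_getElem (by rw [hlen]; exact hq),
            PySem.List.getElem_pyRange_one]
          simp
        rw [hgp, hgq]
        omega
    have hrel := pvFoldRel (pvRel N)
      (fun roots (i : Int) =>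
        (PySem.List.pyRange (i + 1) (N : Int) 1).foldl (fun roots j =>
          if (PySem.List.pyGetD ss i (0, 0, 0)).1 ≠ (PySem.List.pyGetD ss j (0, 0, 0)).1 ∧
             (PySem.List.pyGetD ss i (0, 0, 0)).2.2 ≥ (PySem.List.pyGetD ss j (0, 0, 0)).2.1 then
            csUnion roots i.toNat j.toNat
          else roots) roots)
      (fun labels (i : Int) =>
        (PySem.List.pyRange (i + 1) (N : Int) 1).foldl (fun labels j =>
          if (PySem.List.pyGetD ss i (0, 0, 0)).1 ≠ (PySem.List.pyGetD ss j (0, 0, 0)).1 ∧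
             (PySem.List.pyGetD ss i (0, 0, 0)).2.2 ≥ (PySem.List.pyGetD ss j (0, 0, 0)).2.1 then
            (if PySem.List.pyGetD labels i 0 ≠ PySem.List.pyGetD labels j 0 then
              labels.map (fun x =>
                if x = PySem.List.pyGetD labels j 0 then PySem.List.pyGetD labels i 0 else x)
            else labels)
          else labels) labels)
      (PySem.List.pyRange 0 (N : Int) 1)
      (fun rootsAcc labelsAcc i hiMem hrelA => by
        obtain ⟨hi0, hiN⟩ := PySem.List.mem_pyRange_one.mp hiMem
        exact pvFoldRel (pvRel N) _ _ (PySem.List.pyRange (i + 1) (N : Int) 1)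
          (fun roots labels j hjMem hrelB => by
            obtain ⟨hj1, hjN⟩ := PySem.List.mem_pyRange_one.mp hjMem
            by_cases hC : (PySem.List.pyGetD ss i (0, 0, 0)).1 ≠ (PySem.List.pyGetD ss j (0, 0, 0)).1 ∧
                (PySem.List.pyGetD ss i (0, 0, 0)).2.2 ≥ (PySem.List.pyGetD ss j (0, 0, 0)).2.1
            · rw [if_pos hC, if_pos hC]
              have hll : labels.length = N := hrelB.2.1
              have hpgi : PySem.List.pyGetD labels i 0 = labels.getD i.toNat 0 :=
                pvPyGetD_toNat labels i hi0 (by rw [hll]; exact hiN)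
              have hpgj : PySem.List.pyGetD labels j 0 = labels.getD j.toNat 0 :=
                pvPyGetD_toNat labels j (by omega) (by rw [hll]; exact hjN)
              rw [hpgi, hpgj]
              exact pvStep hrelB (by omega) (by omega)
            · rw [if_neg hC, if_neg hC]
              exact hrelB)
          rootsAcc labelsAcc hrelA)
      _ _ hinit
    exact_mod_cast pvFinal hrel

-- ===== VERDICT (by name: the statement is the Claim_ definition above) =====
theorem connected_segments_spec : Claim_equal_connected_segments := by
  intro segments _
  unfold Spec_connected_segments
  exact pvMain segments
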